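-- pv_equiv track=rewrite | github.com/midatlanticAI/atlandemo | fast_logicbench_benchmark.py | are_logically_connected
-- ===== SOURCE A (Python) =====
-- def are_logically_connected(option_a: str, option_b: str):
--     """Check if two options are logically connected (one implies the other)"""
--     option_a_lower = option_a.lower()
--     option_b_lower = option_b.lower()
--
--     # Look for causal relationships
--     causal_pairs = [
--         (['eat unhealthy', 'eat junk'], ['feel sluggish', 'get sick', 'diseases']),
--         (['take care of health', 'exercise'], ['stay fit', 'feel healthy']),
--         (['take cab', 'taxi'], ['arrive on time', 'arrive quickly']),
--         (['go outdoors', 'outside'], ['get tan', 'vitamin d']),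
--         (['stay up late', 'no sleep'], ['feel tired', 'exhausted']),
--         (['pollute', 'drive car'], ['hurt environment', 'air pollution']),
--     ]
--
--     for causes, effects in causal_pairs:
--         a_is_cause = any(phrase in option_a_lower for phrase in causes)
--         b_is_effect = any(phrase in option_b_lower for phrase in effects)
--         a_is_effect = any(phrase in option_a_lower for phrase in effects)
--         b_is_cause = any(phrase in option_b_lower for phrase in causes)
--
--         if (a_is_cause and b_is_effect) or (a_is_effect and b_is_cause):
--             return True
--
--     return False
-- ===== SOURCE B (Python) =====
-- def are_logically_connected(option_a: str, option_b: str):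
--     """Decide causal connection by building matched-group index sets and intersecting."""
--     a = option_a.lower()
--     b = option_b.lower()
--
--     causal_pairs = [
--         (['eat unhealthy', 'eat junk'], ['feel sluggish', 'get sick', 'diseases']),
--         (['take care of health', 'exercise'], ['stay fit', 'feel healthy']),
--         (['take cab', 'taxi'], ['arrive on time', 'arrive quickly']),
--         (['go outdoors', 'outside'], ['get tan', 'vitamin d']),
--         (['stay up late', 'no sleep'], ['feel tired', 'exhausted']),
--         (['pollute', 'drive car'], ['hurt environment', 'air pollution']),
--     ]
--
--     a_causes = {i for i, (causes, _) in enumerate(causal_pairs) if any(p in a for p in causes)}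
--     a_effects = {i for i, (_, effects) in enumerate(causal_pairs) if any(p in a for p in effects)}
--     b_causes = {i for i, (causes, _) in enumerate(causal_pairs) if any(p in b for p in causes)}
--     b_effects = {i for i, (_, effects) in enumerate(causal_pairs) if any(p in b for p in effects)}
--
--     return bool(a_causes & b_effects) or bool(a_effects & b_causes)
-- ===== Notes on version B (the rewrite author's own statement) =====
-- stated objective: alternative
-- what changed: Replaces the per-pair early-return loop with four one-pass matched-group index-set comprehensions over the enumerated causal pairs, deciding connection by set intersection; group identity is kept via the index.
import Mathlib
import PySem

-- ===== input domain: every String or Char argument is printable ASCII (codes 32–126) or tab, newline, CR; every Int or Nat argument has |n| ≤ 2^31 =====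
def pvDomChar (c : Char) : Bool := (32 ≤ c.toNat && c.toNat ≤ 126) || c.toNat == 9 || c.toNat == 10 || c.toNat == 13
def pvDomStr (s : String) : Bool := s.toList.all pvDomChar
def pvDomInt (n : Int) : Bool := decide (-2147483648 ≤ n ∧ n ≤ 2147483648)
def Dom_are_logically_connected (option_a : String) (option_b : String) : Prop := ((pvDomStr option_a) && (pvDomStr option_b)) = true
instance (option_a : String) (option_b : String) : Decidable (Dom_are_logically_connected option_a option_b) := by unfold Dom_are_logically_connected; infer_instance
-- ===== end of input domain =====

-- B replaces A's per-pair dual-condition early-return loop by building matched-group index sets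
-- once and testing set intersections (objective: alternative decomposition, same cost).

-- The causal-pairs table shared verbatim by both Pythons.
def pvCausalPairs : List (List String × List String) :=
  [ (["eat unhealthy", "eat junk"], ["feel sluggish", "get sick", "diseases"]),
    (["take care of health", "exercise"], ["stay fit", "feel healthy"]),
    (["take cab", "taxi"], ["arrive on time", "arrive quickly"]),
    (["go outdoors", "outside"], ["get tan", "vitamin d"]),
    (["stay up late", "no sleep"], ["feel tired", "exhausted"]),
    (["pollute", "drive car"], ["hurt environment", "air pollution"]) ]

-- ===== PORT A =====
-- A's for-loop with early return, as structural recursion over the pairs list.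
def pvLoopA (al bl : String) : List (List String × List String) → Bool
  | [] => false
  | (causes, effects) :: rest =>
      let a_is_cause := causes.any (fun p => PySem.Str.isIn p al)
      let b_is_effect := effects.any (fun p => PySem.Str.isIn p bl)
      let a_is_effect := effects.any (fun p => PySem.Str.isIn p al)
      let b_is_cause := causes.any (fun p => PySem.Str.isIn p bl)
      if (a_is_cause && b_is_effect) || (a_is_effect && b_is_cause) then true
      else pvLoopA al bl rest

def are_logically_connected (option_a : String) (option_b : String) : Bool :=
  let option_a_lower := PySem.Str.lower option_a
  let option_b_lower := PySem.Str.lower option_b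
  pvLoopA option_a_lower option_b_lower pvCausalPairs

-- ===== PORT B =====
-- B's set comprehension {i for i, (…) in enumerate(causal_pairs) if any(p in t for p in sel(group))}.
def pvMatched (t : String) (sel : List String × List String → List String) : PySem.Set Int :=
  PySem.Set.ofList
    (((PySem.List.enumerate pvCausalPairs 0).filter
        (fun ix => (sel ix.2).any (fun p => PySem.Str.isIn p t))).map Prod.fst)

def are_logically_connected_alt (option_a : String) (option_b : String) : Bool :=
  let a := PySem.Str.lower option_a
  let b := PySem.Str.lower option_b
  let a_causes := pvMatched a Prod.fst
  let a_effects := pvMatched a Prod.snd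
  let b_causes := pvMatched b Prod.fst
  let b_effects := pvMatched b Prod.snd
  !(PySem.Set.inter a_causes b_effects).isEmpty || !(PySem.Set.inter a_effects b_causes).isEmpty

-- ===== PRECONDITION & SPEC =====
def Spec_are_logically_connected (option_a : String) (option_b : String) (out : Bool) : Prop := out = are_logically_connected_alt option_a option_b
instance (option_a : String) (option_b : String) (out : Bool) : Decidable (Spec_are_logically_connected option_a option_b out) := by unfold Spec_are_logically_connected; infer_instance

-- ===== CLAIM (what is proved, stated in full; the proofs are below) =====
def Claim_equal_are_logically_connected : Prop := ∀ (option_a : String) (option_b : String), Dom_are_logically_connected option_a option_b → Spec_are_logically_connected option_a option_b (are_logically_connected option_a option_b)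

-- ===== LEMMAS AND PROOFS =====

-- The index list underlying a comprehension, with explicit start offset s.
def pvIdxList {α : Type} (q : α → Bool) (s : Int) (ps : List α) : List Int :=
  ((PySem.List.enumerate ps s).filter (fun ix => q ix.2)).map Prod.fst

lemma pvIdxList_nil {α : Type} (q : α → Bool) (s : Int) : pvIdxList q s ([] : List α) = [] := rfl

lemma pvIdxList_cons {α : Type} (q : α → Bool) (s : Int) (x : α) (xs : List α) :
    pvIdxList q s (x :: xs) =
      (if q x then [s] else []) ++ pvIdxList q (s + 1) xs := by
  simp [pvIdxList, PySem.List.enumerate_cons, List.filter_cons]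
  split <;> simp

lemma pvIdxList_lb {α : Type} (q : α → Bool) (s : Int) (ps : List α) :
    ∀ y ∈ pvIdxList q s ps, s ≤ y := by
  induction ps generalizing s with
  | nil => simp [pvIdxList_nil]
  | cons x xs ih =>
      intro y hy
      rw [pvIdxList_cons] at hy
      rcases List.mem_append.mp hy with h | h
      · split at h <;> simp_all
      · have := ih (s + 1) y h; omega

-- Distinct enumeration indices: two comprehensions share an index iff one pair satisfies both filters.
lemma pvInter_iff {α : Type} (q r : α → Bool) (s : Int) (ps : List α) :
    (∃ y, y ∈ pvIdxList q s ps ∧ y ∈ pvIdxList r s ps) ↔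
      (∃ x ∈ ps, q x = true ∧ r x = true) := by
  induction ps generalizing s with
  | nil => simp [pvIdxList_nil]
  | cons x xs ih =>
      constructor
      · rintro ⟨y, hq, hr⟩
        rw [pvIdxList_cons] at hq hr
        rcases List.mem_append.mp hq with h1 | h1
        · obtain ⟨hqx, hys⟩ : q x = true ∧ y = s := by split at h1 <;> simp_all
          rcases List.mem_append.mp hr with h2 | h2
          · have hrx : r x = true := by split at h2 <;> simp_all
            exact ⟨x, by simp, hqx, hrx⟩
          · exact absurd (pvIdxList_lb r (s + 1) xs y h2) (by omega)
        · rcases List.mem_append.mp hr with h2 | h2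
          · have hys : y = s := by split at h2 <;> simp_all
            exact absurd (pvIdxList_lb q (s + 1) xs y h1) (by omega)
          · obtain ⟨z, hz, hzq, hzr⟩ := (ih (s + 1)).mp ⟨y, h1, h2⟩
            exact ⟨z, List.mem_cons_of_mem _ hz, hzq, hzr⟩
      · rintro ⟨z, hz, hzq, hzr⟩
        rcases List.mem_cons.mp hz with rfl | hz'
        · refine ⟨s, ?_, ?_⟩ <;> rw [pvIdxList_cons]
          · simp [hzq]
          · simp [hzr]
        · obtain ⟨y, h1, h2⟩ := (ih (s + 1)).mpr ⟨z, hz', hzq, hzr⟩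
          refine ⟨y, ?_, ?_⟩ <;> rw [pvIdxList_cons]
          · exact List.mem_append_right _ h1
          · exact List.mem_append_right _ h2

lemma pv_if_or (b t : Bool) : (if b = true then true else t) = (b || t) := by
  cases b <;> simp

-- A's early-return loop is List.any of the per-pair condition.
lemma pvLoopA_eq_any (al bl : String) (ps : List (List String × List String)) :
    pvLoopA al bl ps =
      ps.any (fun ce =>
        (ce.1.any (fun p => PySem.Str.isIn p al) && ce.2.any (fun p => PySem.Str.isIn p bl)) ||
        (ce.2.any (fun p => PySem.Str.isIn p al) && ce.1.any (fun p => PySem.Str.isIn p bl))) := by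
  induction ps with
  | nil => rfl
  | cons x xs ih =>
      obtain ⟨c, e⟩ := x
      simp only [pvLoopA, List.any_cons, ih]
      exact pv_if_or _ _

lemma pvSetNonempty {α : Type} (l : List α) : ((!l.isEmpty) = true) ↔ ∃ y, y ∈ l := by
  cases l <;> simp

-- The Bool "intersection of two matched index sets is nonempty" as a per-pair existential.
lemma pvInterNonempty_iff (t u : String)
    (sel1 sel2 : List String × List String → List String) :
    ((!(PySem.Set.inter (pvMatched t sel1) (pvMatched u sel2)).isEmpty) = true) ↔
      (∃ x ∈ pvCausalPairs,
        ((sel1 x).any (fun p => PySem.Str.isIn p t)) = true ∧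
        ((sel2 x).any (fun p => PySem.Str.isIn p u)) = true) := by
  rw [pvSetNonempty]
  constructor
  · rintro ⟨y, hy⟩
    rw [PySem.Set.mem_inter] at hy
    simp only [pvMatched, PySem.Set.mem_ofList] at hy
    exact (pvInter_iff (fun ce => (sel1 ce).any (fun p => PySem.Str.isIn p t))
      (fun ce => (sel2 ce).any (fun p => PySem.Str.isIn p u)) 0 pvCausalPairs).mp ⟨y, hy.1, hy.2⟩
  · intro h
    obtain ⟨y, h1, h2⟩ := (pvInter_iff (fun ce => (sel1 ce).any (fun p => PySem.Str.isIn p t))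
      (fun ce => (sel2 ce).any (fun p => PySem.Str.isIn p u)) 0 pvCausalPairs).mpr h
    exact ⟨y, (PySem.Set.mem_inter _ _ _).mpr
      (by simp only [pvMatched, PySem.Set.mem_ofList]; exact ⟨h1, h2⟩)⟩

-- ===== VERDICT (by name: the statement is the Claim_ definition above) =====
theorem are_logically_connected_spec : Claim_equal_are_logically_connected := by
  intro oa ob _
  unfold Spec_are_logically_connected
  simp only [are_logically_connected, are_logically_connected_alt]
  rw [pvLoopA_eq_any, Bool.eq_iff_iff]
  simp only [Bool.or_eq_true, pvInterNonempty_iff, List.any_eq_true, Bool.and_eq_true]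
  exact ⟨fun ⟨x, hx, h⟩ => h.elim (fun h => Or.inl ⟨x, hx, h⟩) (fun h => Or.inr ⟨x, hx, h⟩),
         fun h => h.elim (fun ⟨x, hx, h⟩ => ⟨x, hx, Or.inl h⟩) (fun ⟨x, hx, h⟩ => ⟨x, hx, Or.inr h⟩)⟩
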